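-- pv_equiv track=rewrite | github.com/AlfonsoCifuentes/riskmap | src/reporting/report_generator.py | _group_regions_by_area
-- ===== SOURCE A (Python) =====
-- from typing import Dict, List, Any, Optional, Tuple
--
-- def _group_regions_by_area(regional_events: List[Dict]) -> Dict[str, List[Dict]]:
--     """Group regions by geographical area."""
--     area_mapping = {
--         'Europe': ['ukraine', 'russia', 'poland', 'germany', 'france', 'uk', 'spain', 'italy', 'turkey'],
--         'Middle East': ['syria', 'iran', 'israel', 'palestine', 'iraq', 'saudi arabia', 'yemen', 'lebanon'],
--         'Asia': ['china', 'japan', 'korea', 'india', 'pakistan', 'afghanistan', 'thailand', 'vietnam'],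
--         'Africa': ['nigeria', 'egypt', 'south africa', 'ethiopia', 'libya', 'sudan', 'morocco'],
--         'Americas': ['usa', 'america', 'brazil', 'argentina', 'mexico', 'colombia', 'venezuela', 'canada']
--     }
--
--     grouped = {area: [] for area in area_mapping.keys()}
--     grouped['Other'] = []
--
--     for event in regional_events:
--         countries = [c.lower() for c in event.get('countries', [])]
--         assigned = False
--
--         for area, area_countries in area_mapping.items():
--             if any(country in area_countries for country in countries):
--                 grouped[area].append(event)
--                 assigned = True
--                 break
--
--         if not assigned:
--             grouped['Other'].append(event)
--
--     # Remove empty areas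
--     return {area: events for area, events in grouped.items() if events}
-- ===== SOURCE B (Python) =====
-- def _group_regions_by_area(regional_events):
--     """Group regions by geographical area (reverse-index implementation)."""
--     area_mapping = {
--         'Europe': ['ukraine', 'russia', 'poland', 'germany', 'france', 'uk', 'spain', 'italy', 'turkey'],
--         'Middle East': ['syria', 'iran', 'israel', 'palestine', 'iraq', 'saudi arabia', 'yemen', 'lebanon'],
--         'Asia': ['china', 'japan', 'korea', 'india', 'pakistan', 'afghanistan', 'thailand', 'vietnam'],
--         'Africa': ['nigeria', 'egypt', 'south africa', 'ethiopia', 'libya', 'sudan', 'morocco'],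
--         'Americas': ['usa', 'america', 'brazil', 'argentina', 'mexico', 'colombia', 'venezuela', 'canada']
--     }
--     names = list(area_mapping)
--     rev = {c: i for i, cs in enumerate(area_mapping.values()) for c in cs}
--     buckets = [[] for _ in range(len(names) + 1)]
--     for event in regional_events:
--         lowered = [c.lower() for c in event.get('countries', [])]
--         idxs = [rev[c] for c in lowered if c in rev]
--         buckets[min(idxs) if idxs else len(names)].append(event)
--     return {name: b for name, b in zip(names + ['Other'], buckets) if b}
-- ===== Notes on version B (the rewrite author's own statement) =====
-- stated objective: idiomatic
-- what changed: B builds a reverse index country->area-position once and assigns each event to the minimum matched position (A's first-area-in-mapping-order precedence), accumulating into positional buckets, instead of A's inner scan over all five area lists per event.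
import Mathlib
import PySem

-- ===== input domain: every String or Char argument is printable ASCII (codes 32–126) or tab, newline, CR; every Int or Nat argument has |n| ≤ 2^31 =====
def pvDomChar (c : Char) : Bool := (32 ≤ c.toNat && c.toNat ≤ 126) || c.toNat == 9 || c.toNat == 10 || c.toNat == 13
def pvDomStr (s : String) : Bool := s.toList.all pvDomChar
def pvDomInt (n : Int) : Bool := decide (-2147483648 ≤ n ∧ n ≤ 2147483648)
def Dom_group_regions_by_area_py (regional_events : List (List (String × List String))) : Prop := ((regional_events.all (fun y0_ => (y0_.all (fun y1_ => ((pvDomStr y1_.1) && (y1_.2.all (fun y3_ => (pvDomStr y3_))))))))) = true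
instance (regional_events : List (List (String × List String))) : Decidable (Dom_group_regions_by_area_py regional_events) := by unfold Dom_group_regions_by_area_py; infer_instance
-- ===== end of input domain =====

-- B replaces A's per-event scan over the five area lists by a reverse index country → area
-- position built once, assigning each event to the minimum matched position (same precedence);
-- objective: more idiomatic grouping, A's inner scan disappears.  Both return values only.

abbrev PvEv := List (String × List String)

-- the five area country lists (named so both ports share the literals)
def pvL0 : List String := ["ukraine", "russia", "poland", "germany", "france", "uk", "spain", "italy", "turkey"]
def pvL1 : List String := ["syria", "iran", "israel", "palestine", "iraq", "saudi arabia", "yemen", "lebanon"]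
def pvL2 : List String := ["china", "japan", "korea", "india", "pakistan", "afghanistan", "thailand", "vietnam"]
def pvL3 : List String := ["nigeria", "egypt", "south africa", "ethiopia", "libya", "sudan", "morocco"]
def pvL4 : List String := ["usa", "america", "brazil", "argentina", "mexico", "colombia", "venezuela", "canada"]

-- ===== PORT A =====
def pvAreaMapping : List (String × List String) :=
  [("Europe", pvL0), ("Middle East", pvL1), ("Asia", pvL2), ("Africa", pvL3), ("Americas", pvL4)]

-- countries = [c.lower() for c in event.get('countries', [])]
def pvACountries (event : PvEv) : List String :=
  ((PySem.Dict.mk event).getD "countries" []).map PySem.Str.lower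

-- the inner 'for area, area_countries in area_mapping.items(): … break' loop
-- grouped[area].append(event) is modify area [] (· ++ [event]); the key is always present
def pvAInner (event : PvEv) (countries : List String) :
    List (String × List String) → PySem.Dict String (List PvEv) →
    PySem.Dict String (List PvEv) × Bool
  | [], g => (g, false)
  | (area, area_countries) :: rest, g =>
    if countries.any (fun country => area_countries.contains country) then
      (g.modify area [] (fun l => l ++ [event]), true)
    else pvAInner event countries rest g

-- one iteration of the 'for event in regional_events' loop
def pvAStep (g : PySem.Dict String (List PvEv)) (event : PvEv) :
    PySem.Dict String (List PvEv) :=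
  let countries := pvACountries event
  let r := pvAInner event countries pvAreaMapping g
  if r.2 then r.1 else r.1.modify "Other" [] (fun l => l ++ [event])

def group_regions_by_area_py (regional_events : List (List (String × List String))) :
    List (String × List (List (String × List String))) :=
  let grouped := (pvAreaMapping.map (fun p => p.1)).foldl
      (fun d area => d.insert area []) PySem.Dict.empty
  let grouped := grouped.insert "Other" []
  let final := regional_events.foldl pvAStep grouped
  final.items.filter (fun p => !p.2.isEmpty)

-- ===== PORT B =====
def pvNames : List String := ["Europe", "Middle East", "Asia", "Africa", "Americas"]

-- rev = {c: i for i, cs in enumerate(area_mapping.values()) for c in cs}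
def pvRev : PySem.Dict String Int :=
  (PySem.List.enumerate (pvAreaMapping.map (fun p => p.2))).foldl
    (fun d p => p.2.foldl (fun d c => d.insert c p.1) d) PySem.Dict.empty

-- one iteration of B's loop: buckets[min(idxs) if idxs else 5].append(event)
def pvBStep (bs : List (List PvEv)) (event : PvEv) : List (List PvEv) :=
  let lowered := ((PySem.Dict.mk event).getD "countries" []).map PySem.Str.lower
  let idxs := lowered.filterMap (fun c => pvRev.get? c)
  let i : Int := match PySem.List.min? idxs (fun x => x) with
    | some m => m
    | none => 5
  PySem.List.pySetD bs i (PySem.List.pyGetD bs i [] ++ [event])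

def group_regions_by_area_py_alt (regional_events : List (List (String × List String))) :
    List (String × List (List (String × List String))) :=
  let buckets := regional_events.foldl pvBStep [[], [], [], [], [], []]
  ((pvNames ++ ["Other"]).zip buckets).filter (fun p => !p.2.isEmpty)

-- ===== PRECONDITION & SPEC =====
def Spec_group_regions_by_area_py (regional_events : List (List (String × List String))) (out : List (String × List (List (String × List String)))) : Prop := out = group_regions_by_area_py_alt regional_events
instance (regional_events : List (List (String × List String))) (out : List (String × List (List (String × List String)))) : Decidable (Spec_group_regions_by_area_py regional_events out) := by unfold Spec_group_regions_by_area_py; infer_instance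

-- ===== CLAIM (what is proved, stated in full; the proofs are below) =====
def Claim_equal_group_regions_by_area_py : Prop := ∀ (regional_events : List (List (String × List String))), Dom_group_regions_by_area_py regional_events → Spec_group_regions_by_area_py regional_events (group_regions_by_area_py regional_events)

-- ===== LEMMAS AND PROOFS =====

-- the common per-event area index: first area (in mapping order) containing a country, 5 = Other
def pvChain (countries : List String) : Int :=
  if countries.any (fun country => pvL0.contains country) then 0
  else if countries.any (fun country => pvL1.contains country) then 1
  else if countries.any (fun country => pvL2.contains country) then 2
  else if countries.any (fun country => pvL3.contains country) then 3
  else if countries.any (fun country => pvL4.contains country) then 4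
  else 5

def pvIdx (event : PvEv) : Int := pvChain (pvACountries event)

-- per-country index as A's chain sees it
def pvJ (c : String) : Int :=
  if pvL0.contains c then 0
  else if pvL1.contains c then 1
  else if pvL2.contains c then 2
  else if pvL3.contains c then 3
  else if pvL4.contains c then 4
  else 5

lemma pvGet?_mkmap {v' : Type} (L : List String) (v : v') (rest : List (String × v')) (c : String) :
    (PySem.Dict.mk (L.map (fun s => (s, v)) ++ rest)).get? c
      = if L.contains c then some v else (PySem.Dict.mk rest).get? c := by
  induction L with
  | nil => simp
  | cons s t ih =>
    by_cases h : s = c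
    · subst h; simp [PySem.Dict.get?_mk_cons]
    · simp [PySem.Dict.get?_mk_cons, h, ih, Ne.symm h]

lemma pvRev_eq : pvRev = PySem.Dict.mk ((pvL0.map (fun s => (s, (0 : Int))))
    ++ (pvL1.map (fun s => (s, 1)) ++ (pvL2.map (fun s => (s, 2))
    ++ (pvL3.map (fun s => (s, 3)) ++ (pvL4.map (fun s => (s, 4)) ++ []))))) := by
  set_option maxRecDepth 4096 in decide

lemma pvRev_get? (c : String) : pvRev.get? c =
    (if pvL0.contains c then some 0
     else if pvL1.contains c then some (1 : Int)
     else if pvL2.contains c then some 2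
     else if pvL3.contains c then some 3
     else if pvL4.contains c then some 4
     else none) := by
  rw [pvRev_eq, pvGet?_mkmap, pvGet?_mkmap, pvGet?_mkmap, pvGet?_mkmap, pvGet?_mkmap]
  simp [PySem.Dict.get?]

lemma pvRev_bounds {c : String} {v : Int} (h : pvRev.get? c = some v) : 0 ≤ v ∧ v ≤ 4 := by
  rw [pvRev_get?] at h
  split_ifs at h <;> simp_all <;> omega

lemma pvRev_get?_eq_ite (c : String) : pvRev.get? c = if pvJ c = 5 then none else some (pvJ c) := by
  rw [pvRev_get?]; unfold pvJ; split_ifs <;> simp_all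

-- generic min-foldl helpers
lemma pvFoldlMin (l : List Int) (a b : Int) : l.foldl min (min a b) = min a (l.foldl min b) := by
  induction l generalizing b with
  | nil => rfl
  | cons x t ih => simp only [List.foldl_cons, min_assoc, ih]

lemma pvFoldlMinLe (l : List Int) (a : Int) : l.foldl min a <= a := by
  induction l generalizing a with
  | nil => simp
  | cons x t ih => exact le_trans (ih _) (min_le_left _ _)

lemma pvMatchFoldl (l : List Int) (h : forall y, y ∈ l → y ≤ 5) :
    (match PySem.List.min? l (fun x => x) with | some m => m | none => 5) = l.foldl min 5 := by
  cases l with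
  | nil => rfl
  | cons x t =>
    rw [PySem.List.min?_id_cons]
    have hx : x ≤ 5 := h x (by simp)
    calc t.foldl min x = t.foldl min (min x 5) := by rw [min_eq_left hx]
    _ = min x (t.foldl min 5) := pvFoldlMin t x 5
    _ = List.foldl min 5 (x :: t) := by
        simp only [List.foldl_cons]
        rw [min_comm 5 x, pvFoldlMin]

-- F cs = foldl-min form of B's per-event index
def pvF (cs : List String) : Int := (cs.filterMap (fun c => pvRev.get? c)).foldl min 5

lemma pvF_le (cs : List String) : pvF cs ≤ 5 := pvFoldlMinLe _ _

lemma pvF_cons (c : String) (cs : List String) : pvF (c :: cs) = min (pvJ c) (pvF cs) := by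
  unfold pvF
  rw [List.filterMap_cons, pvRev_get?_eq_ite c]
  by_cases h : pvJ c = 5
  · rw [if_pos h, h]
    have hle := pvF_le cs
    unfold pvF at hle
    exact (min_eq_right hle).symm
  · rw [if_neg h]
    simp only [List.foldl_cons]
    rw [min_comm 5 (pvJ c), pvFoldlMin]

lemma pvChain_bounds (cs : List String) : 0 ≤ pvChain cs ∧ pvChain cs ≤ 5 := by
  unfold pvChain; split_ifs <;> omega

lemma pvChain_cons (c : String) (cs : List String) : pvChain (c :: cs) = min (pvJ c) (pvChain cs) := by
  have hb := pvChain_bounds cs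
  unfold pvChain pvJ at *
  by_cases h0 : pvL0.contains c
  · simp only [List.any_cons, h0]; simp; omega
  · by_cases h1 : pvL1.contains c
    · simp only [List.any_cons, h0, h1]; simp; split_ifs <;> omega
    · by_cases h2 : pvL2.contains c
      · simp only [List.any_cons, h0, h1, h2]; simp; split_ifs <;> omega
      · by_cases h3 : pvL3.contains c
        · simp only [List.any_cons, h0, h1, h2, h3]; simp; split_ifs <;> omega
        · by_cases h4 : pvL4.contains c
          · simp only [List.any_cons, h0, h1, h2, h3, h4]; simp; split_ifs <;> omega
          · simp only [List.any_cons, h0, h1, h2, h3, h4]; simp; split_ifs <;> omega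

lemma pvF_eq_chain (cs : List String) : pvF cs = pvChain cs := by
  induction cs with
  | nil => rfl
  | cons c t ih => rw [pvF_cons, pvChain_cons, ih]

-- B's computed index equals pvIdx
lemma pvB_index (event : PvEv) :
    (match PySem.List.min? ((pvACountries event).filterMap (fun c => pvRev.get? c)) (fun x => x) with
      | some m => m | none => 5) = pvIdx event := by
  rw [pvMatchFoldl]
  · exact pvF_eq_chain (pvACountries event)
  · intro y hy
    rcases List.mem_filterMap.mp hy with ⟨c, _, hc⟩
    have := pvRev_bounds hc
    omega

-- parametric forms of the two loop states
def pvGD (l0 l1 l2 l3 l4 l5 : List PvEv) : PySem.Dict String (List PvEv) :=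
  PySem.Dict.mk [("Europe", l0), ("Middle East", l1), ("Asia", l2),
                 ("Africa", l3), ("Americas", l4), ("Other", l5)]

def pvTag (k : Int) (event : PvEv) : List PvEv := if pvIdx event = k then [event] else []

lemma pvAStep_eq (l0 l1 l2 l3 l4 l5 : List PvEv) (e : PvEv) :
    pvAStep (pvGD l0 l1 l2 l3 l4 l5) e =
      pvGD (l0 ++ pvTag 0 e) (l1 ++ pvTag 1 e) (l2 ++ pvTag 2 e)
           (l3 ++ pvTag 3 e) (l4 ++ pvTag 4 e) (l5 ++ pvTag 5 e) := by
  unfold pvAStep pvAInner pvAreaMapping pvGD pvTag pvIdx pvChain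
  by_cases h0 : ∃ x ∈ pvACountries e, x ∈ pvL0
  · simp [h0, PySem.Dict.ext_iff, PySem.Dict.items_insert, PySem.Dict.modify, PySem.Dict.getD, PySem.Dict.get?_mk_cons,
      PySem.Dict.items_insert_of_contains, PySem.Dict.contains_mk]
  · by_cases h1 : ∃ x ∈ pvACountries e, x ∈ pvL1
    · simp [h0, h1, pvAInner, PySem.Dict.ext_iff, PySem.Dict.items_insert, PySem.Dict.modify, PySem.Dict.getD, PySem.Dict.get?_mk_cons,
        PySem.Dict.items_insert_of_contains, PySem.Dict.contains_mk]
    · by_cases h2 : ∃ x ∈ pvACountries e, x ∈ pvL2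
      · simp [h0, h1, h2, pvAInner, PySem.Dict.ext_iff, PySem.Dict.items_insert, PySem.Dict.modify, PySem.Dict.getD, PySem.Dict.get?_mk_cons,
          PySem.Dict.items_insert_of_contains, PySem.Dict.contains_mk]
      · by_cases h3 : ∃ x ∈ pvACountries e, x ∈ pvL3
        · simp [h0, h1, h2, h3, pvAInner, PySem.Dict.ext_iff, PySem.Dict.items_insert, PySem.Dict.modify, PySem.Dict.getD, PySem.Dict.get?_mk_cons,
            PySem.Dict.items_insert_of_contains, PySem.Dict.contains_mk]
        · by_cases h4 : ∃ x ∈ pvACountries e, x ∈ pvL4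
          · simp [h0, h1, h2, h3, h4, pvAInner, PySem.Dict.ext_iff, PySem.Dict.items_insert, PySem.Dict.modify, PySem.Dict.getD, PySem.Dict.get?_mk_cons,
              PySem.Dict.items_insert_of_contains, PySem.Dict.contains_mk]
          · simp [h0, h1, h2, h3, h4, pvAInner, PySem.Dict.ext_iff, PySem.Dict.items_insert, PySem.Dict.modify, PySem.Dict.getD, PySem.Dict.get?_mk_cons,
              PySem.Dict.items_insert_of_contains, PySem.Dict.contains_mk]

lemma pvBStep_eq (l0 l1 l2 l3 l4 l5 : List PvEv) (e : PvEv) :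
    pvBStep [l0, l1, l2, l3, l4, l5] e =
      [l0 ++ pvTag 0 e, l1 ++ pvTag 1 e, l2 ++ pvTag 2 e,
       l3 ++ pvTag 3 e, l4 ++ pvTag 4 e, l5 ++ pvTag 5 e] := by
  have hidx := pvB_index e
  have hb := pvChain_bounds (pvACountries e)
  have hb' : 0 ≤ pvIdx e ∧ pvIdx e ≤ 5 := hb
  unfold pvACountries at hidx
  unfold pvBStep
  dsimp only
  rw [hidx]
  have h5 : pvIdx e = 0 ∨ pvIdx e = 1 ∨ pvIdx e = 2 ∨ pvIdx e = 3 ∨ pvIdx e = 4 ∨ pvIdx e = 5 := by omega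
  rcases h5 with h | h | h | h | h | h <;>
    rw [h] <;>
    simp [pvTag, PySem.List.pySetD, PySem.List.pySet?, PySem.List.pyGetD, PySem.List.pyGet?,
      PySem.List.pyIdx?] <;> omega

def pvBucket (k : Int) (es : List PvEv) : List PvEv := es.filter (fun e => pvIdx e = k)

lemma pvBucket_cons (k : Int) (e : PvEv) (es : List PvEv) :
    pvBucket k (e :: es) = pvTag k e ++ pvBucket k es := by
  unfold pvBucket pvTag
  by_cases h : pvIdx e = k <;> simp [h]

lemma pvAFold (es : List PvEv) : ∀ l0 l1 l2 l3 l4 l5 : List PvEv,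
    es.foldl pvAStep (pvGD l0 l1 l2 l3 l4 l5) =
      pvGD (l0 ++ pvBucket 0 es) (l1 ++ pvBucket 1 es) (l2 ++ pvBucket 2 es)
           (l3 ++ pvBucket 3 es) (l4 ++ pvBucket 4 es) (l5 ++ pvBucket 5 es) := by
  induction es with
  | nil => intro l0 l1 l2 l3 l4 l5; simp [pvBucket]
  | cons e es ih =>
    intro l0 l1 l2 l3 l4 l5
    rw [List.foldl_cons, pvAStep_eq, ih]
    simp only [pvBucket_cons, List.append_assoc]

lemma pvBFold (es : List PvEv) : ∀ l0 l1 l2 l3 l4 l5 : List PvEv,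
    es.foldl pvBStep [l0, l1, l2, l3, l4, l5] =
      [l0 ++ pvBucket 0 es, l1 ++ pvBucket 1 es, l2 ++ pvBucket 2 es,
       l3 ++ pvBucket 3 es, l4 ++ pvBucket 4 es, l5 ++ pvBucket 5 es] := by
  induction es with
  | nil => intro l0 l1 l2 l3 l4 l5; simp [pvBucket]
  | cons e es ih =>
    intro l0 l1 l2 l3 l4 l5
    rw [List.foldl_cons, pvBStep_eq, ih]
    simp only [pvBucket_cons, List.append_assoc]

lemma pvAInit : ((pvAreaMapping.map (fun p => p.1)).foldl
    (fun d area => d.insert area []) (PySem.Dict.empty : PySem.Dict String (List PvEv))).insert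
    "Other" [] = pvGD [] [] [] [] [] [] := by decide

-- ===== VERDICT (by name: the statement is the Claim_ definition above) =====
theorem group_regions_by_area_py_spec : Claim_equal_group_regions_by_area_py := by
  intro es _
  unfold Spec_group_regions_by_area_py group_regions_by_area_py group_regions_by_area_py_alt
  dsimp only
  rw [pvAInit, pvAFold, pvBFold]
  simp [pvGD, pvNames, List.zip]
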